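-- pv_equiv track=rewrite | github.com/lucafusarbassini/research-automation | core/prompt_suggestions.py | detect_stuck_pattern
-- ===== SOURCE A (Python) =====
-- from collections import Counter
--
-- def detect_stuck_pattern(history: list[str]) -> bool:
--     """Detect if the user/agent is going in circles.
--
--     Looks for repeated subsequences in the action history. A cycle of length
--     N is detected when the same ordered subsequence appears at least twice
--     in the recent history.
--
--     Args:
--         history: Ordered list of action descriptions (most recent last).
--
--     Returns:
--         True if a repetitive loop is detected.
--     """
--     if len(history) < 4:
--         return False
--
--     # Normalize entries for comparison.
--     normalized = [h.strip().lower() for h in history]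
--
--     # Check for cycles of length 1..len//2.
--     for cycle_len in range(1, len(normalized) // 2 + 1):
--         # Slide a window and count how many times the same subsequence repeats.
--         subseqs: list[tuple[str, ...]] = []
--         for i in range(0, len(normalized) - cycle_len + 1):
--             subseqs.append(tuple(normalized[i : i + cycle_len]))
--
--         counts = Counter(subseqs)
--         most_common_count = counts.most_common(1)[0][1]
--         if most_common_count >= 3 and cycle_len <= 3:
--             return True
--         if most_common_count >= 2 and cycle_len >= 2:
--             return True
--
--     return False
-- ===== SOURCE B (Python) =====
-- from collections import Counter
--
-- def detect_stuck_pattern(history: list[str]) -> bool: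
--     """One pass: a loop exists iff some normalized action occurs >= 3 times
--     or some adjacent pair of normalized actions occurs >= 2 times."""
--     if len(history) < 4:
--         return False
--     norm = [h.strip().lower() for h in history]
--     elem_counts = Counter(norm)
--     pair_counts = Counter(zip(norm, norm[1:]))
--     return max(elem_counts.values()) >= 3 or max(pair_counts.values()) >= 2
-- ===== Notes on version B (the rewrite author's own statement) =====
-- stated objective: alternative
-- what changed: A slides windows of every cycle length 1..n/2 and builds a Counter per length; B makes one pass building just an element Counter and an adjacent-pair Counter, since any repeated window of length >= 2 forces a repeated adjacent pair.
import Mathlib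
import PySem

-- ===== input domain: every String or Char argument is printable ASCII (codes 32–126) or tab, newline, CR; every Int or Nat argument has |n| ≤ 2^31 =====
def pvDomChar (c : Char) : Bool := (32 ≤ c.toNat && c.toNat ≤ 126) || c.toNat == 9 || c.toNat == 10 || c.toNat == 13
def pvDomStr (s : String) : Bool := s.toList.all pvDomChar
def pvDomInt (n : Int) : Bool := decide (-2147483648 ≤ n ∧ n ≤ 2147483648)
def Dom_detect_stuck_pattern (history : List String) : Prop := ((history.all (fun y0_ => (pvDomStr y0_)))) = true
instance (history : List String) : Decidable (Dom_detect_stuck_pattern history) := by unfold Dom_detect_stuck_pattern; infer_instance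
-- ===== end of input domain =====

-- B replaces A's per-cycle-length window scan by one pass over elements and adjacent pairs
-- (a repeat of any window of length ≥ 2 forces a repeated adjacent pair): same value, different algorithm.

-- ===== PORT A =====

-- normalized = [h.strip().lower() for h in history]
def pvNorm (history : List String) : List String :=
  history.map (fun h => PySem.Str.lower (PySem.Str.strip h))

-- the inner window loop: subseqs.append(tuple(normalized[i : i + cycle_len]))
def pvSubseqs (normalized : List String) (cycle_len : Int) : List (List String) :=
  (PySem.List.pyRange 0 ((normalized.length : Int) - cycle_len + 1)).foldl
    (fun subseqs i => subseqs ++ [PySem.List.slice normalized (some i) (some (i + cycle_len))]) []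

-- counts.most_common(1)[0][1]  (Counter.most_common sorts items by count, descending)
def pvMostCommon1Count (counts : PySem.Dict (List String) Int) : Int :=
  ((PySem.List.sorted counts.items (fun p => p.2) true).headD ([], 0)).2

-- the outer loop over cycle_len with its two early returns
def pvCycleLoop (normalized : List String) : List Int → Bool
  | [] => false
  | cycle_len :: rest =>
    let subseqs := pvSubseqs normalized cycle_len
    let counts := PySem.Dict.counter subseqs
    let most_common_count := pvMostCommon1Count counts
    if 3 ≤ most_common_count ∧ cycle_len ≤ 3 then true
    else if 2 ≤ most_common_count ∧ 2 ≤ cycle_len then true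
    else pvCycleLoop normalized rest

def detect_stuck_pattern (history : List String) : Bool :=
  if history.length < 4 then false
  else
    let normalized := pvNorm history
    pvCycleLoop normalized
      (PySem.List.pyRange 1 (PySem.Int.floordiv (normalized.length : Int) 2 + 1))

-- ===== PORT B =====

def detect_stuck_pattern_alt (history : List String) : Bool :=
  if history.length < 4 then false
  else
    let norm := history.map (fun h => PySem.Str.lower (PySem.Str.strip h))
    let elem_counts := PySem.Dict.counter norm
    let pair_counts := PySem.Dict.counter (norm.zip (PySem.List.slice norm (some 1) none))
    decide (3 ≤ (PySem.List.max? elem_counts.values (fun v => v)).getD 0)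
      || decide (2 ≤ (PySem.List.max? pair_counts.values (fun v => v)).getD 0)

-- ===== PRECONDITION & SPEC =====
def Spec_detect_stuck_pattern (history : List String) (out : Bool) : Prop := out = detect_stuck_pattern_alt history
instance (history : List String) (out : Bool) : Decidable (Spec_detect_stuck_pattern history out) := by unfold Spec_detect_stuck_pattern; infer_instance

-- ===== CLAIM (what is proved, stated in full; the proofs are below) =====
def Claim_equal_detect_stuck_pattern : Prop := ∀ (history : List String), Dom_detect_stuck_pattern history → Spec_detect_stuck_pattern history (detect_stuck_pattern history)

-- ===== LEMMAS AND PROOFS =====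

-- the two loop-detection facts both programs compute: a triple element / a repeated adjacent pair
def pvHasTriple (l : List String) : Prop := ∃ v, 3 ≤ l.count v
def pvHasPairRep (l : List String) : Prop := ∃ p, 2 ≤ ((l.zip (l.drop 1)).count p)

-- windows of length c, in Nat form
def pvWindows (l : List String) (c : Nat) : List (List String) :=
  (List.range (l.length - c + 1)).map (fun k => (l.drop k).take c)

-- first two elements of a window
def pvGPair : List String → String × String
  | a :: b :: _ => (a, b)
  | _ => ("", "")

lemma pv_slice_nat (l : List String) (a b : Nat) (hab : a ≤ b) (hb : b ≤ l.length) :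
    PySem.List.slice l (some (a : Int)) (some (b : Int)) = (l.drop a).take (b - a) := by
  simp [PySem.List.slice]
  rw [min_eq_left hb, min_eq_left (hab.trans hb)]

lemma pv_slice_one_none (l : List String) :
    PySem.List.slice l (some 1) none = l.drop 1 := by
  cases l with
  | nil => rfl
  | cons x t =>
    simp [PySem.List.slice, List.take_of_length_le]

lemma pv_subseqs_eq (l : List String) (cl : Int) (h1 : 1 ≤ cl) (h2 : cl ≤ (l.length : Int)) :
    pvSubseqs l cl = pvWindows l cl.toNat := by
  unfold pvSubseqs pvWindows
  rw [PySem.List.foldl_append_singleton_eq_map, PySem.List.pyRange_one]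
  rw [List.map_map, List.nil_append]
  have hn : (((l.length : Int) - cl + 1) - 0).toNat = l.length - cl.toNat + 1 := by omega
  rw [hn]
  refine List.map_congr_left (fun k hk => ?_)
  rw [List.mem_range] at hk
  have hkc : k + cl.toNat ≤ l.length := by omega
  simp only [Function.comp]
  have e1 : (0 : Int) + (k : Int) = ((k : Nat) : Int) := by omega
  have e2 : (k : Int) + cl = (((k + cl.toNat : Nat)) : Int) := by omega
  rw [e1, e2, pv_slice_nat l k (k + cl.toNat) (by omega) hkc]
  congr 1
  omega

lemma pv_windows_ne_nil (l : List String) (c : Nat) : pvWindows l c ≠ [] := by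
  intro h
  have := congrArg List.length h
  simp [pvWindows] at this

lemma pv_take_two (l : List String) (i : Nat) (h : i + 1 < l.length) :
    (l.drop i).take 2 = [l[i], l[i+1]] := by
  rw [List.drop_eq_getElem_cons (by omega : i < l.length)]
  rw [List.drop_eq_getElem_cons h]
  rfl

lemma pv_gpair_take (l : List String) (i c' : Nat) (h : i + 1 < l.length) :
    pvGPair ((l.drop i).take (c' + 2)) = (l[i], l[i+1]) := by
  rw [List.drop_eq_getElem_cons (by omega : i < l.length)]
  rw [List.drop_eq_getElem_cons h]
  rfl

lemma pv_windows_one (l : List String) (h : 1 ≤ l.length) :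
    pvWindows l 1 = l.map (fun v => [v]) := by
  unfold pvWindows
  apply List.ext_getElem
  · simp; omega
  · intro i h1 h2
    simp only [List.getElem_map, List.getElem_range]
    have hi : i < l.length := by simpa using h2
    rw [List.drop_eq_getElem_cons hi]
    rfl

lemma pv_windows_two (l : List String) (h : 2 ≤ l.length) :
    pvWindows l 2 = (l.zip (l.drop 1)).map (fun p => [p.1, p.2]) := by
  unfold pvWindows
  apply List.ext_getElem
  · simp; omega
  · intro i h1 h2
    have hi : i + 1 < l.length := by
      simp [List.length_zip] at h2; omega
    simp only [List.getElem_map, List.getElem_range, List.getElem_zip, List.getElem_drop]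
    rw [pv_take_two l i hi]
    have : 1 + i = i + 1 := by omega
    simp [this]

lemma pv_windows_gpair (l : List String) (c : Nat) (hc : 2 ≤ c) (hcn : c ≤ l.length) :
    (pvWindows l c).map pvGPair = (l.zip (l.drop 1)).take (l.length - c + 1) := by
  obtain ⟨c', rfl⟩ : ∃ c', c = c' + 2 := ⟨c - 2, by omega⟩
  unfold pvWindows
  apply List.ext_getElem
  · simp [List.length_zip]; omega
  · intro i h1 h2
    have hi : i + 1 < l.length := by
      simp at h1; omega
    simp only [List.map_map, List.getElem_map, List.getElem_range, List.getElem_take,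
      List.getElem_zip, List.getElem_drop, Function.comp]
    rw [pv_gpair_take l i c' hi]
    have : 1 + i = i + 1 := by omega
    simp [this]

-- most_common(1)[0][1] ≥ k  ↔  some window repeats ≥ k times
lemma pv_mc_ge_iff (ws : List (List String)) (hne : ws ≠ []) (k : Int) :
    k ≤ pvMostCommon1Count (PySem.Dict.counter ws) ↔ ∃ w ∈ ws, k ≤ (ws.count w : Int) := by
  unfold pvMostCommon1Count
  cases hs : PySem.List.sorted (PySem.Dict.counter ws).items (fun p => p.2) true with
  | nil =>
    exfalso
    rw [PySem.List.sorted_eq_nil_iff] at hs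
    rw [PySem.Dict.items_counter] at hs
    obtain ⟨x, t, rfl⟩ := List.exists_cons_of_ne_nil hne
    have hx : x ∈ PySem.Set.ofList (x :: t) := (PySem.Set.mem_ofList _ _).mpr (by simp)
    rw [List.map_eq_nil_iff] at hs
    rw [hs] at hx
    simp at hx
  | cons m t =>
    simp only [List.headD]
    constructor
    · intro hk
      have hmsort : m ∈ PySem.List.sorted (PySem.Dict.counter ws).items (fun p => p.2) true := by
        rw [hs]; simp
      have hm := ((PySem.List.sorted_perm (PySem.Dict.counter ws).items (fun p => p.2) true).mem_iff).mp hmsort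
      rw [PySem.Dict.items_counter] at hm
      obtain ⟨w, hw, rfl⟩ := List.mem_map.mp hm
      exact ⟨w, (PySem.Set.mem_ofList _ _).mp hw, hk⟩
    · rintro ⟨w, hw, hcnt⟩
      have hmem : (w, (ws.count w : Int)) ∈ (PySem.Dict.counter ws).items := by
        rw [PySem.Dict.items_counter]
        exact List.mem_map.mpr ⟨w, (PySem.Set.mem_ofList _ _).mpr hw, rfl⟩
      have hle := PySem.List.key_head_sorted_rev_ge _ (fun p => p.2) hs _ hmem
      exact le_trans hcnt hle

-- max(Counter(xs).values()) ≥ k  ↔  some element repeats ≥ k times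
lemma pv_maxval_ge_iff {κ : Type} [BEq κ] [LawfulBEq κ] (xs : List κ) (hne : xs ≠ []) (k : Int) :
    k ≤ (PySem.List.max? (PySem.Dict.counter xs).values (fun v => v)).getD 0 ↔
      ∃ v ∈ xs, k ≤ (xs.count v : Int) := by
  have hv : (PySem.Dict.counter xs).values = (PySem.Set.ofList xs).map (fun v => (xs.count v : Int)) := by
    simp [PySem.Dict.values, PySem.Dict.items_counter, List.map_map, Function.comp_def]
  rw [hv]
  cases hmax : PySem.List.max? ((PySem.Set.ofList xs).map (fun v => (xs.count v : Int))) (fun v => v) with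
  | none =>
    exfalso
    rw [PySem.List.max?_eq_none_iff] at hmax
    rw [List.map_eq_nil_iff] at hmax
    obtain ⟨x, t, rfl⟩ := List.exists_cons_of_ne_nil hne
    have hx : x ∈ PySem.Set.ofList (x :: t) := (PySem.Set.mem_ofList _ _).mpr (by simp)
    rw [hmax] at hx
    simp at hx
  | some m =>
    simp only [Option.getD_some]
    constructor
    · intro hk
      have hm := PySem.List.max?_mem hmax
      obtain ⟨v, hv', rfl⟩ := List.mem_map.mp hm
      exact ⟨v, (PySem.Set.mem_ofList _ _).mp hv', hk⟩
    · rintro ⟨v, hv', hcnt⟩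
      have hmem : (xs.count v : Int) ∈ (PySem.Set.ofList xs).map (fun v => (xs.count v : Int)) :=
        List.mem_map.mpr ⟨v, (PySem.Set.mem_ofList _ _).mpr hv', rfl⟩
      have := PySem.List.max?_isMax hmax _ hmem
      exact le_trans hcnt this

lemma pv_loop_iff (l : List String) (cls : List Int) :
    pvCycleLoop l cls = true ↔ ∃ cl ∈ cls,
      (3 ≤ pvMostCommon1Count (PySem.Dict.counter (pvSubseqs l cl)) ∧ cl ≤ 3) ∨
      (2 ≤ pvMostCommon1Count (PySem.Dict.counter (pvSubseqs l cl)) ∧ 2 ≤ cl) := by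
  induction cls with
  | nil => simp [pvCycleLoop]
  | cons cl rest ih =>
    have hstep : pvCycleLoop l (cl :: rest) =
        (if 3 ≤ pvMostCommon1Count (PySem.Dict.counter (pvSubseqs l cl)) ∧ cl ≤ 3 then true
         else if 2 ≤ pvMostCommon1Count (PySem.Dict.counter (pvSubseqs l cl)) ∧ 2 ≤ cl then true
         else pvCycleLoop l rest) := rfl
    rw [hstep]
    clear hstep
    by_cases h1 : 3 ≤ pvMostCommon1Count (PySem.Dict.counter (pvSubseqs l cl)) ∧ cl ≤ 3
    · rw [if_pos h1]
      exact ⟨fun _ => ⟨cl, by simp, Or.inl h1⟩, fun _ => rfl⟩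
    · by_cases h2 : 2 ≤ pvMostCommon1Count (PySem.Dict.counter (pvSubseqs l cl)) ∧ 2 ≤ cl
      · rw [if_neg h1, if_pos h2]
        exact ⟨fun _ => ⟨cl, by simp, Or.inr h2⟩, fun _ => rfl⟩
      · rw [if_neg h1, if_neg h2]
        rw [ih]
        constructor
        · rintro ⟨c, hc, hp⟩
          exact ⟨c, List.mem_cons_of_mem _ hc, hp⟩
        · rintro ⟨c, hc, hp⟩
          rcases List.mem_cons.mp hc with heq | hc'
          · rw [heq] at hp
            rcases hp with hp | hp
            · exact absurd hp h1
            · exact absurd hp h2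
          · exact ⟨c, hc', hp⟩

-- the mapping [v] ↦ v and (a,b) ↦ [a,b] are injective
lemma pv_single_inj : Function.Injective (fun v : String => [v]) := by
  intro a b h; simpa using h

lemma pv_pair_inj : Function.Injective (fun p : String × String => [p.1, p.2]) := by
  intro a b h
  simp at h
  exact Prod.ext h.1 h.2

-- the heart: A's outer loop is exactly "triple element or repeated adjacent pair"
lemma pv_main (l : List String) (h4 : 4 ≤ l.length) :
    (pvCycleLoop l (PySem.List.pyRange 1 (PySem.Int.floordiv (l.length : Int) 2 + 1)) = true ↔
      pvHasTriple l ∨ pvHasPairRep l) := by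
  have hfd : PySem.Int.floordiv (l.length : Int) 2 = ((l.length / 2 : Nat) : Int) := by
    exact_mod_cast PySem.Int.floordiv_natCast l.length 2
  have hhalf : 2 ≤ l.length / 2 := by omega
  have hhalfle : l.length / 2 ≤ l.length := Nat.div_le_self _ _
  rw [pv_loop_iff]
  constructor
  · rintro ⟨cl, hmem, hcond⟩
    rw [hfd, PySem.List.mem_pyRange_one] at hmem
    have hcl1 : 1 ≤ cl := hmem.1
    have hcln : cl ≤ (l.length : Int) := by
      have := hmem.2
      omega
    rw [pv_subseqs_eq l cl hcl1 hcln] at hcond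
    by_cases hcl2 : 2 ≤ cl
    · right
      have hmc2 : 2 ≤ pvMostCommon1Count (PySem.Dict.counter (pvWindows l cl.toNat)) := by
        rcases hcond with ⟨h, _⟩ | ⟨h, _⟩ <;> omega
      obtain ⟨w, hw, hcnt⟩ := (pv_mc_ge_iff _ (pv_windows_ne_nil l _) 2).mp hmc2
      have hcnt' : 2 ≤ (pvWindows l cl.toNat).count w := by exact_mod_cast hcnt
      have hcle : cl.toNat ≤ l.length := by omega
      have hc2 : 2 ≤ cl.toNat := by omega
      have h1 : 2 ≤ (((pvWindows l cl.toNat).map pvGPair).count (pvGPair w)) :=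
        le_trans hcnt' List.count_le_count_map
      rw [pv_windows_gpair l cl.toNat hc2 hcle] at h1
      exact ⟨pvGPair w, le_trans h1 (List.Sublist.count_le _ (List.take_sublist _ _))⟩
    · have hcl : cl = 1 := by omega
      subst hcl
      left
      rcases hcond with ⟨h3, _⟩ | ⟨_, habs⟩
      · rw [show (1 : Int).toNat = 1 from rfl, pv_windows_one l (by omega)] at h3
        have hne1 : l.map (fun v => [v]) ≠ [] := by
          intro hnil
          rw [List.map_eq_nil_iff] at hnil
          rw [hnil] at h4
          simp at h4
        obtain ⟨w, hw, hcnt⟩ := (pv_mc_ge_iff _ hne1 3).mp h3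
        obtain ⟨v, hv, rfl⟩ := List.mem_map.mp hw
        rw [List.count_map_of_injective _ _ pv_single_inj] at hcnt
        exact ⟨v, by exact_mod_cast hcnt⟩
      · omega
  · intro h
    rcases h with ⟨v, hv⟩ | ⟨p, hp⟩
    · refine ⟨1, ?_, Or.inl ⟨?_, by norm_num⟩⟩
      · rw [hfd, PySem.List.mem_pyRange_one]
        constructor
        · norm_num
        · omega
      · rw [pv_subseqs_eq l 1 le_rfl (by omega)]
        rw [show (1 : Int).toNat = 1 from rfl, pv_windows_one l (by omega)]
        have hne1 : l.map (fun v => [v]) ≠ [] := by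
          intro hnil
          rw [List.map_eq_nil_iff] at hnil
          rw [hnil] at h4
          simp at h4
        apply (pv_mc_ge_iff _ hne1 3).mpr
        have hvl : v ∈ l := List.count_pos_iff.mp (by omega)
        refine ⟨[v], List.mem_map.mpr ⟨v, hvl, rfl⟩, ?_⟩
        rw [List.count_map_of_injective _ _ pv_single_inj]
        exact_mod_cast hv
    · refine ⟨2, ?_, Or.inr ⟨?_, le_rfl⟩⟩
      · rw [hfd, PySem.List.mem_pyRange_one]
        constructor
        · norm_num
        · omega
      · rw [pv_subseqs_eq l 2 (by norm_num) (by omega)]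
        rw [show (2 : Int).toNat = 2 from rfl, pv_windows_two l (by omega)]
        have hne2 : (l.zip (l.drop 1)).map (fun p => [p.1, p.2]) ≠ [] := by
          intro hnil
          rw [List.map_eq_nil_iff] at hnil
          have := congrArg List.length hnil
          rw [List.length_zip] at this
          simp only [List.length_drop, List.length_nil] at this
          omega
        apply (pv_mc_ge_iff _ hne2 2).mpr
        have hpl : p ∈ l.zip (l.drop 1) := List.count_pos_iff.mp (by omega)
        refine ⟨[p.1, p.2], List.mem_map.mpr ⟨p, hpl, rfl⟩, ?_⟩
        rw [List.count_map_of_injective _ _ pv_pair_inj]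
        exact_mod_cast hp

-- ===== VERDICT (by name: the statement is the Claim_ definition above) =====
theorem detect_stuck_pattern_spec : Claim_equal_detect_stuck_pattern := by
  intro history _
  unfold Spec_detect_stuck_pattern
  by_cases h : history.length < 4
  · simp [detect_stuck_pattern, detect_stuck_pattern_alt, h]
  · simp only [detect_stuck_pattern, detect_stuck_pattern_alt, pvNorm, if_neg h]
    set l := history.map (fun h => PySem.Str.lower (PySem.Str.strip h)) with hl
    have h4 : 4 ≤ l.length := by
      rw [hl, List.length_map]
      omega
    rw [Bool.eq_iff_iff]
    rw [pv_main l h4]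
    rw [pv_slice_one_none]
    simp only [Bool.or_eq_true, decide_eq_true_eq]
    have hlne : l ≠ [] := by
      intro hnil
      rw [hnil] at h4
      simp at h4
    have hzne : l.zip (l.drop 1) ≠ [] := by
      intro hnil
      have := congrArg List.length hnil
      rw [List.length_zip, List.length_drop] at this
      simp only [List.length_nil] at this
      omega
    rw [pv_maxval_ge_iff l hlne 3, pv_maxval_ge_iff (l.zip (l.drop 1)) hzne 2]
    unfold pvHasTriple pvHasPairRep
    constructor
    · rintro (⟨v, hv⟩ | ⟨p, hp⟩)
      · exact Or.inl ⟨v, List.count_pos_iff.mp (by omega), by exact_mod_cast hv⟩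
      · exact Or.inr ⟨p, List.count_pos_iff.mp (by omega), by exact_mod_cast hp⟩
    · rintro (⟨v, _, hv⟩ | ⟨p, _, hp⟩)
      · exact Or.inl ⟨v, by exact_mod_cast hv⟩
      · exact Or.inr ⟨p, by exact_mod_cast hp⟩
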